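-- pv_equiv track=rewrite | github.com/parkCoit/dojangProject | data_structure/unit_26_공배수.py | num2
-- ===== SOURCE A (Python) =====
-- def num2(c, d):
--     a = {i  for i in range(1, d+1) if c % i == 0}
--     b = {i for i in range(1, d + 1) if d % i == 0}
--
--     #a = {i for i in range(1, d + 1) if c % i == 0 and d % i == 0}  이것도 같은 코드
--     #divisor = a
--
--
--     divisor = a & b
--
--     result = 0
--     if type(divisor) == set:
--         result = sum(divisor)
--     return result
-- ===== SOURCE B (Python) =====
-- def num2(c, d):
--     if d <= 0:
--         return 0
--     a, b = abs(c), d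
--     while b:
--         a, b = b, a % b
--     g = a
--     return sum(i for i in range(1, g + 1) if g % i == 0)
-- ===== Notes on version B (the rewrite author's own statement) =====
-- stated objective: faster
-- what changed: B replaces the two O(d) range scans plus set intersection with a Euclidean gcd followed by a single divisor scan bounded by gcd(|c|,d), which is usually far smaller than d.
import Mathlib
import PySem

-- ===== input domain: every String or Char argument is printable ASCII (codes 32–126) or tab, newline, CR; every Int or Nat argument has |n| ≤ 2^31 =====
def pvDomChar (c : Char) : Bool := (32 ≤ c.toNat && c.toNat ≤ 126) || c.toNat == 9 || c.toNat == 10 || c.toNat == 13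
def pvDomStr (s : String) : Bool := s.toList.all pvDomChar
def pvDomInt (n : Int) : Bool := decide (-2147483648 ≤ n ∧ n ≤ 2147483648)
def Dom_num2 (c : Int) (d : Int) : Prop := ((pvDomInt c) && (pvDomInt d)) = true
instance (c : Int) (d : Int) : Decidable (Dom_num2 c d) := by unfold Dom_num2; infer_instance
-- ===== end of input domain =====

-- B replaces A's two O(d) range scans + set intersection by a Euclidean gcd followed by one divisor
-- scan bounded by gcd(|c|,d) (objective: faster; the common divisors of c and d are the divisors of their gcd).


-- ===== PORT A =====
def num2 (c : Int) (d : Int) : Int :=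
  -- a = {i for i in range(1, d+1) if c % i == 0}
  let a : PySem.Set Int :=
    PySem.Set.ofList ((PySem.List.pyRange 1 (d+1) 1).filter (fun i => PySem.Int.mod c i == 0))
  -- b = {i for i in range(1, d+1) if d % i == 0}
  let b : PySem.Set Int :=
    PySem.Set.ofList ((PySem.List.pyRange 1 (d+1) 1).filter (fun i => PySem.Int.mod d i == 0))
  -- divisor = a & b
  let divisor : PySem.Set Int := PySem.Set.inter a b
  -- result = 0; if type(divisor) == set: result = sum(divisor)   (the test is always true)
  let result : Int := 0
  let result : Int := divisor.sum   -- sum over a set: order-independent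
  result

-- ===== PORT B =====
-- while b: a, b = b, a % b
def euclidLoop (a : Int) (b : Int) : Int :=
  if b = 0 then a else euclidLoop b (PySem.Int.mod a b)
termination_by b.natAbs
decreasing_by
  rename_i hb
  rcases lt_or_gt_of_ne hb with h | h
  · have := PySem.Int.mod_neg_bounds a h; omega
  · have h1 := PySem.Int.mod_nonneg a h; have h2 := PySem.Int.mod_lt a h; omega

def num2_alt (c : Int) (d : Int) : Int :=
  if d ≤ 0 then 0
  else
    let g := euclidLoop |c| d
    -- sum(i for i in range(1, g+1) if g % i == 0)
    (((PySem.List.pyRange 1 (g+1) 1).filter (fun i => PySem.Int.mod g i == 0)).sum : Int)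

-- ===== PRECONDITION & SPEC =====
def Spec_num2 (c : Int) (d : Int) (out : Int) : Prop := out = num2_alt c d
instance (c : Int) (d : Int) (out : Int) : Decidable (Spec_num2 c d out) := by unfold Spec_num2; infer_instance

-- ===== CLAIM (what is proved, stated in full; the proofs are below) =====
def Claim_equal_num2 : Prop := ∀ (c : Int) (d : Int), Dom_num2 c d → Spec_num2 c d (num2 c d)

-- ===== LEMMAS AND PROOFS =====

-- euclidLoop computes the gcd on nonnegative inputs
theorem euclidLoop_eq_gcd (a b : Int) (ha : 0 ≤ a) (hb : 0 ≤ b) :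
    euclidLoop a b = (Int.gcd a b : Int) := by
  by_cases h : b = 0
  · subst h
    rw [euclidLoop]
    simp [Int.gcd, Int.natAbs_of_nonneg ha]
  · have hbpos : 0 < b := lt_of_le_of_ne hb (Ne.symm h)
    rw [euclidLoop, if_neg h, PySem.Int.mod_eq_emod_of_pos hbpos]
    have hrec := euclidLoop_eq_gcd b (a % b) hb (Int.emod_nonneg a h)
    rw [hrec]
    congr 1
    show Int.gcd b (a % b) = Int.gcd a b
    unfold Int.gcd
    rw [Int.natAbs_emod_of_nonneg ha b]
    rw [Nat.gcd_comm a.natAbs b.natAbs, Nat.gcd_rec b.natAbs a.natAbs, Nat.gcd_comm]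
termination_by b.natAbs
decreasing_by
  have h1 := Int.emod_nonneg a h
  have h2 := Int.emod_lt_of_pos a hbpos
  omega

theorem num2_spec_core (c d : Int) : num2 c d = num2_alt c d := by
  by_cases hd : d ≤ 0
  · -- both sides are 0: the ranges are empty
    unfold num2 num2_alt
    rw [if_pos hd]
    rw [PySem.List.pyRange_one_eq_nil (by omega)]
    simp [PySem.Set.ofList, PySem.Set.empty, PySem.Set.inter]
  · rw [not_le] at hd
    have hg0 : 0 < (Int.gcd c d : Int) := by
      have : d ≠ 0 := by omega
      have : Int.gcd c d ≠ 0 := by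
        simp [Int.gcd_eq_zero_iff]
        omega
      omega
    have hgd : (Int.gcd c d : Int) ∣ d := Int.gcd_dvd_right c d
    have hgle : (Int.gcd c d : Int) ≤ d := Int.le_of_dvd hd hgd
    unfold num2 num2_alt
    rw [if_neg (by omega)]
    have hgcd : euclidLoop |c| d = (Int.gcd c d : Int) := by
      rw [euclidLoop_eq_gcd |c| d (abs_nonneg c) (le_of_lt hd)]
      congr 1
      unfold Int.gcd
      rw [Int.natAbs_abs]
    set g : Int := (Int.gcd c d : Int) with hgdef
    rw [hgcd]
    -- A's sets are nodup lists, so ofList is the identity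
    rw [PySem.Set.ofList_eq_self_of_nodup _ ((PySem.List.nodup_pyRange_one _ _).filter _),
        PySem.Set.ofList_eq_self_of_nodup _ ((PySem.List.nodup_pyRange_one _ _).filter _)]
    simp only [PySem.Set.inter, PySem.Set.contains, List.filter_filter]
    -- pointwise: the combined test equals divisibility by g
    have hcong : (PySem.List.pyRange 1 (d+1) 1).filter
        (fun a => ((PySem.List.pyRange 1 (d+1) 1).filter (fun i => PySem.Int.mod d i == 0)).contains a && (PySem.Int.mod c a == 0))
        = (PySem.List.pyRange 1 (d+1) 1).filter (fun i => PySem.Int.mod g i == 0) := by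
      apply List.filter_congr
      intro i hi
      have hi' := PySem.List.mem_pyRange_one.mp hi
      rw [Bool.eq_iff_iff]
      simp only [Bool.and_eq_true, List.contains_iff_mem, List.mem_filter, beq_iff_eq,
        PySem.Int.mod_eq_zero_iff_dvd, hi, true_and]
      constructor
      · rintro ⟨hid, hic⟩
        have h1 : i.natAbs ∣ Int.gcd c d := Int.dvd_gcd (Int.natAbs_dvd.mpr hic) (Int.natAbs_dvd.mpr hid)
        have h2 : (i.natAbs : Int) ∣ g := Int.natCast_dvd_natCast.mpr h1
        rwa [Int.natAbs_of_nonneg (by omega)] at h2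
      · intro hig
        exact ⟨hig.trans hgd, hig.trans (Int.gcd_dvd_left c d)⟩
    rw [hcong]
    -- split the range at g+1; divisors of g beyond g do not occur
    rw [PySem.List.pyRange_one_append 1 (g+1) (d+1) (by omega) (by omega),
        List.filter_append]
    have htail : (PySem.List.pyRange (g+1) (d+1) 1).filter (fun i => PySem.Int.mod g i == 0) = [] := by
      rw [List.filter_eq_nil_iff]
      intro i hi
      have hi' := PySem.List.mem_pyRange_one.mp hi
      simp only [beq_iff_eq, PySem.Int.mod_eq_zero_iff_dvd]
      intro hig
      have := Int.le_of_dvd hg0 hig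
      omega
    rw [htail, List.append_nil]

-- ===== VERDICT (by name: the statement is the Claim_ definition above) =====
theorem num2_spec : Claim_equal_num2 := by
  intro c d _
  unfold Spec_num2
  exact num2_spec_core c d
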